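-- pv_equiv track=rewrite | github.com/chrislundeen/sfz-presets | scripts/make_sfz_from_config.py | velocity_ranges
-- ===== SOURCE A (Python) =====
-- from math import floor
-- from typing import Any, Dict, Iterable, List, Sequence
--
-- def velocity_ranges(values: Sequence[int]) -> List[tuple[int, int, int]]:
--     values = sorted(values)
--     ranges: List[tuple[int, int, int]] = []
--     low = 1
--     for idx, val in enumerate(values):
--         if idx + 1 < len(values):
--             next_val = values[idx + 1]
--             hi = int(floor((val + next_val) / 2))
--         else:
--             hi = 127
--         ranges.append((low, hi, val))
--         low = hi + 1
--     if ranges: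
--         ranges[-1] = (ranges[-1][0], 127, ranges[-1][2])
--     return ranges
-- ===== SOURCE B (Python) =====
-- def velocity_ranges(values):
--     vs = sorted(values)
--     n = len(vs)
--
--     def lo(i):
--         return 1 if i == 0 else (vs[i - 1] + vs[i]) // 2 + 1
--
--     def hi(i):
--         return (vs[i] + vs[i + 1]) // 2 if i + 1 < n else 127
--
--     return [(lo(i), hi(i), vs[i]) for i in range(n)]
-- ===== Notes on version B (the rewrite author's own statement) =====
-- stated objective: simpler
-- what changed: A is a stateful scan that threads a running low accumulator (low = previous hi + 1) through the loop and then patches the last triple's hi to 127 after the fact; B is a stateless indexed map over the sorted list in which each triple's lo and hi are computed independently from the neighbouring values (lo from the left neighbour's midpoint, hi from the right neighbour's), so there is no carried state and no post-hoc patch.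
import Mathlib
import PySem

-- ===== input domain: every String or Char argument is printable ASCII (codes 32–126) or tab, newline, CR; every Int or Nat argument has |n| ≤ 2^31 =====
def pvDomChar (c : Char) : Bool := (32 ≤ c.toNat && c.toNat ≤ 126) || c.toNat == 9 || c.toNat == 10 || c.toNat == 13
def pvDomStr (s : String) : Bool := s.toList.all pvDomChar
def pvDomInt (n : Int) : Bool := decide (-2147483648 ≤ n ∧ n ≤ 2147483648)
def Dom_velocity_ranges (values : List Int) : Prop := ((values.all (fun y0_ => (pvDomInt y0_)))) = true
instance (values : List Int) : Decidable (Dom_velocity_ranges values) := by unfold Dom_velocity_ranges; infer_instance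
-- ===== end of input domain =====

-- B replaces A's stateful scan (running `low = hi + 1` accumulator plus a post-hoc last-element
-- patch) by a stateless indexed map: lo and hi of each entry are computed independently from the
-- neighbouring sorted values (objective: simpler decomposition, same cost).

-- ===== PORT A =====
-- A's loop: for idx, val in enumerate(values): look ahead at values[idx+1] (here the head of
-- the remaining suffix, the same value), append (low, hi, val), low = hi + 1.
-- floor((val+next)/2) over Python floats is exact for |val|,|next| ≤ 2^31 (sum < 2^53), so it
-- is ported as integer floor division.
def velocityRangesLoopA (acc : List (Int × Int × Int)) (low : Int) :
    List Int → List (Int × Int × Int)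
  | [] => acc
  | val :: rest =>
    let hi : Int :=
      match rest with
      | next :: _ => PySem.Int.floordiv (val + next) 2
      | [] => 127
    velocityRangesLoopA (acc ++ [(low, hi, val)]) (hi + 1) rest

def velocity_ranges (values : List Int) : List (Int × Int × Int) :=
  let vs := PySem.List.sorted values (fun x => x) false
  let ranges := velocityRangesLoopA [] 1 vs
  -- if ranges: ranges[-1] = (ranges[-1][0], 127, ranges[-1][2])
  match ranges.getLast? with
  | none => ranges
  | some t => ranges.dropLast ++ [(t.1, 127, t.2.2)]

-- ===== PORT B =====
-- Source B: lo(i) and hi(i) read the neighbours of vs[i]; all indices are in range, so Python's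
-- vs[i] is List.getD i 0 exactly.
def velocity_ranges_alt (values : List Int) : List (Int × Int × Int) :=
  let vs := PySem.List.sorted values (fun x => x) false
  let n := vs.length
  (List.range n).map (fun i =>
    ((if i = 0 then 1 else PySem.Int.floordiv (vs.getD (i - 1) 0 + vs.getD i 0) 2 + 1),
     (if i + 1 < n then PySem.Int.floordiv (vs.getD i 0 + vs.getD (i + 1) 0) 2 else 127),
     vs.getD i 0))

-- ===== PRECONDITION & SPEC =====
def Spec_velocity_ranges (values : List Int) (out : List (Int × Int × Int)) : Prop := out = velocity_ranges_alt values
instance (values : List Int) (out : List (Int × Int × Int)) : Decidable (Spec_velocity_ranges values out) := by unfold Spec_velocity_ranges; infer_instance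

-- ===== CLAIM (what is proved, stated in full; the proofs are below) =====
def Claim_equal_velocity_ranges : Prop := ∀ (values : List Int), Dom_velocity_ranges values → Spec_velocity_ranges values (velocity_ranges values)

-- ===== LEMMAS AND PROOFS =====

-- structural core of A's loop without the accumulator
def velGen (low : Int) : List Int → List (Int × Int × Int)
  | [] => []
  | val :: rest =>
    let hi : Int :=
      match rest with
      | next :: _ => PySem.Int.floordiv (val + next) 2
      | [] => 127
    (low, hi, val) :: velGen (hi + 1) rest

theorem velocityRangesLoopA_eq (vs : List Int) : ∀ (acc : List (Int × Int × Int)) (low : Int),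
    velocityRangesLoopA acc low vs = acc ++ velGen low vs := by
  induction vs with
  | nil => intro acc low; simp [velocityRangesLoopA, velGen]
  | cons v rest ih =>
    intro acc low
    simp [velocityRangesLoopA, velGen, ih]

-- every nonempty velGen result ends in a triple whose hi is 127
theorem velGen_shape (v : Int) (rest : List Int) : ∀ low, ∃ init a c,
    velGen low (v :: rest) = init ++ [(a, (127 : Int), c)] := by
  induction rest generalizing v with
  | nil => intro low; exact ⟨[], low, v, rfl⟩
  | cons next rest' ih =>
    intro low
    obtain ⟨init, a, c, h⟩ := ih next (PySem.Int.floordiv (v + next) 2 + 1)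
    exact ⟨(low, PySem.Int.floordiv (v + next) 2, v) :: init, a, c, by
      rw [velGen]; rw [h]; simp⟩

theorem patch_velGen (v : Int) (rest : List Int) (low : Int) :
    (match (velGen low (v :: rest)).getLast? with
     | none => velGen low (v :: rest)
     | some t => (velGen low (v :: rest)).dropLast ++ [(t.1, 127, t.2.2)]) =
    velGen low (v :: rest) := by
  obtain ⟨init, a, c, h⟩ := velGen_shape v rest low
  rw [h]
  simp

-- neighbour-based reformulation: lo computed from the previous value (none at the head)
def loOf (prev : Option Int) (v : Int) : Int :=
  match prev with
  | none => 1
  | some p => PySem.Int.floordiv (p + v) 2 + 1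

def bGen (prev : Option Int) : List Int → List (Int × Int × Int)
  | [] => []
  | v :: rest =>
    (loOf prev v,
     (match rest with
      | next :: _ => PySem.Int.floordiv (v + next) 2
      | [] => 127), v) :: bGen (some v) rest

theorem velGen_eq_bGen : ∀ (rest : List Int) (prev : Option Int) (v : Int),
    velGen (loOf prev v) (v :: rest) = bGen prev (v :: rest) := by
  intro rest
  induction rest with
  | nil => intro prev v; simp [velGen, bGen]
  | cons next rest' ih =>
    intro prev v
    have h := ih (some v) next
    simp only [velGen, bGen] at h ⊢
    rw [show PySem.Int.floordiv (v + next) 2 + 1 = loOf (some v) next from rfl, h]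

-- the previous value, as B's indexed lo sees it
def prevAt (ws : List Int) (k : Nat) : Option Int :=
  if k = 0 then none else some (ws.getD (k - 1) 0)

-- the indexed map over a suffix equals bGen on that suffix
theorem range_map_eq_bGen (ws : List Int) : ∀ (suf : List Int) (k : Nat), ws.drop k = suf →
    (List.range suf.length).map (fun j =>
      ((if k + j = 0 then 1 else
          PySem.Int.floordiv (ws.getD (k + j - 1) 0 + ws.getD (k + j) 0) 2 + 1),
       (if k + j + 1 < ws.length then
          PySem.Int.floordiv (ws.getD (k + j) 0 + ws.getD (k + j + 1) 0) 2 else 127),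
       ws.getD (k + j) 0)) = bGen (prevAt ws k) suf := by
  intro suf
  induction suf with
  | nil => intro k _; simp [bGen]
  | cons v rest ih =>
    intro k hdrop
    have hksome : ws[k]? = some v := by
      have h0 : (ws.drop k)[0]? = ws[k]? := by
        simpa using (List.getElem?_drop (xs := ws) (i := k) (j := 0))
      rw [← h0, hdrop]; rfl
    have hkv : ws.getD k 0 = v := by simp [List.getD, hksome]
    have hklt : k < ws.length := (List.getElem?_eq_some_iff.mp hksome).1
    have hlen : ws.length = k + rest.length + 1 := by
      have hd : (ws.drop k).length = ws.length - k := by simp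
      rw [hdrop] at hd; simp at hd; omega
    simp only [List.length_cons]
    rw [List.range_succ_eq_map, List.map_cons, List.map_map]
    congr 1
    · -- head element
      cases rest with
      | nil =>
        have hc : ¬ (k + 0 + 1 < ws.length) := by
          simp only [List.length_nil] at hlen; omega
        cases k with
        | zero => simp [loOf, prevAt, hksome, List.getD, if_neg hc]
        | succ k' => simp [loOf, prevAt, hksome, List.getD, if_neg hc]
      | cons next rest' =>
        have hnsome : ws[k + 1]? = some next := by
          have h1 : (ws.drop k)[1]? = ws[k+1]? := by
            simpa using (List.getElem?_drop (xs := ws) (i := k) (j := 1))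
          rw [← h1, hdrop]; rfl
        have hc : k + 0 + 1 < ws.length := by
          simp only [List.length_cons] at hlen; omega
        cases k with
        | zero => simp [loOf, prevAt, hksome, hnsome, List.getD, if_pos hc]
        | succ k' => simp [loOf, prevAt, hksome, hnsome, List.getD, if_pos hc]
    · -- tail
      have htail := ih (k + 1) (by
        have : ws.drop (k + 1) = (ws.drop k).tail := by
          rw [List.drop_add_one_eq_tail_drop]
        rw [this, hdrop]; rfl)
      have hprev : prevAt ws (k + 1) = some v := by
        rw [show prevAt ws (k + 1) = some (ws.getD k 0) from rfl, hkv]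
      rw [hprev] at htail
      rw [← htail]
      apply List.map_congr_left
      intro j _
      have : k + 1 + j = k + (j + 1) := by omega
      simp [this]

-- ===== VERDICT (by name: the statement is the Claim_ definition above) =====
theorem velocity_ranges_spec : Claim_equal_velocity_ranges := by
  intro values _
  unfold Spec_velocity_ranges velocity_ranges velocity_ranges_alt
  simp only [velocityRangesLoopA_eq, List.nil_append]
  cases h : PySem.List.sorted values (fun x => x) false with
  | nil => simp [velGen]
  | cons v rest =>
    have hB := range_map_eq_bGen (v :: rest) (v :: rest) 0 (by simp)
    have hA : velGen 1 (v :: rest) = bGen none (v :: rest) := by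
      have := velGen_eq_bGen rest none v
      simpa [loOf] using this
    simp only [Nat.zero_add] at hB
    rw [show prevAt (v :: rest) 0 = none from rfl] at hB
    rw [patch_velGen, hA, ← hB]
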